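-- pv_equiv track=rewrite | github.com/NicolasLacroix/data-representation | notebooks/covid19/tools/analysis_tools.py | getPlotDimensions
-- ===== SOURCE A (Python) =====
-- import math
--
-- def getPlotDimensions(labels):
--     """
--     returns the best (x,y) dimensions for plotting
--     the data with given labels
--     """
--     size = len(labels)
--     if (size == 1):
--         return 1, 1
--     n = 4
--     while (math.ceil(size/n) == 1):
--         n -= 1
--     y = math.ceil(size/n)
--     x = size-y
--     return x, y
-- ===== SOURCE B (Python) =====
-- import math
--
-- def getPlotDimensions(labels):
--     """
--     returns the best (x,y) dimensions for plotting
--     the data with given labels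
--     """
--     size = len(labels)
--     if size == 1:
--         return 1, 1
--     c = math.ceil(size / 4)
--     y = 2 if c == 1 else c
--     return size - y, y
-- ===== Notes on version B (the rewrite author's own statement) =====
-- stated objective: simpler
-- what changed: Replaced the decrementing while-loop that searches for the first n with ceil(size/n) > 1 by a closed-form computation: c = ceil(size/4), y = 2 if c == 1 else c.
import Mathlib
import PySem

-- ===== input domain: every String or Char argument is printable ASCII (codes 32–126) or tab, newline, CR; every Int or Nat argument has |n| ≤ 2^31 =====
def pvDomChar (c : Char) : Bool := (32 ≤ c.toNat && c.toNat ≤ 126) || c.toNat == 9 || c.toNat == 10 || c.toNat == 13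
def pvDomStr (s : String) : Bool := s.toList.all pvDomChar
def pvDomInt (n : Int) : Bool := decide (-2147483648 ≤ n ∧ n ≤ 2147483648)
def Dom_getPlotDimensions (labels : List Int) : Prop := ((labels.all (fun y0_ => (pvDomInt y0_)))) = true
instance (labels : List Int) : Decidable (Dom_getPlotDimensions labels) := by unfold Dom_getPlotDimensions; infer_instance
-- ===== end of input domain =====

-- B drops A's decrementing while-loop and computes y in closed form from ceil(size/4); same values, simpler.

-- math.ceil(size/n) for positive n, exact on integers: ceil(a/b) = -floor(-a/b)
def pyCeilDiv (a b : Int) : Int := -(PySem.Int.floordiv (-a) b)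

-- ===== PORT A =====
-- the while loop 'while ceil(size/n)==1: n -= 1', recursing on n (n = 4,3,2,1; the
-- n = 0 base case is unreachable for size = len(labels) ≥ 0, size ≠ 1)
def loopA (size : Int) : Nat → Nat
  | 0 => 0
  | (n+1) => if pyCeilDiv size ((n : Int)+1) == 1 then loopA size n else n+1

def getPlotDimensions (labels : List Int) : Int × Int :=
  let size : Int := labels.length
  if size == 1 then (1, 1)
  else
    let n := loopA size 4
    let y := pyCeilDiv size (n : Int)
    let x := size - y
    (x, y)

-- ===== PORT B =====
def getPlotDimensions_alt (labels : List Int) : Int × Int :=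
  let size : Int := labels.length
  if size == 1 then (1, 1)
  else
    let c := pyCeilDiv size 4
    let y := if c == 1 then 2 else c
    (size - y, y)

-- ===== PRECONDITION & SPEC =====
def Spec_getPlotDimensions (labels : List Int) (out : Int × Int) : Prop := out = getPlotDimensions_alt labels
instance (labels : List Int) (out : Int × Int) : Decidable (Spec_getPlotDimensions labels out) := by unfold Spec_getPlotDimensions; infer_instance

-- ===== CLAIM (what is proved, stated in full; the proofs are below) =====
def Claim_equal_getPlotDimensions : Prop := ∀ (labels : List Int), Dom_getPlotDimensions labels → Spec_getPlotDimensions labels (getPlotDimensions labels)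

-- ===== LEMMAS AND PROOFS =====

-- reduce both ports to a statement about size = labels.length
theorem ports_eq_of_size (s : Nat) :
    (if (s : Int) == 1 then ((1 : Int), (1 : Int))
     else
       let n := loopA (s : Int) 4
       let y := pyCeilDiv (s : Int) (n : Int)
       ((s : Int) - y, y))
    =
    (if (s : Int) == 1 then ((1 : Int), (1 : Int))
     else
       let c := pyCeilDiv (s : Int) 4
       let y := if c == 1 then 2 else c
       ((s : Int) - y, y)) := by
  by_cases h5 : s ≤ 4
  · interval_cases s <;> decide
  · -- s ≥ 5: ceil(s/4) ≥ 2, so the loop exits at n = 4 and both sides give y = ceil(s/4)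
    have hs : 5 ≤ (s : Int) := by exact_mod_cast Nat.lt_of_not_le h5
    have hc : pyCeilDiv (s : Int) 4 ≠ 1 := by
      unfold pyCeilDiv PySem.Int.floordiv
      rw [Int.fdiv_eq_ediv,
        if_pos (Or.inl (by omega) : (0:Int) ≤ 4 ∨ (4:Int) ∣ -(s:Int))]
      omega
    have hne1 : ((s : Int) == 1) = false := by
      rw [beq_eq_false_iff_ne]; omega
    rw [if_neg (by simp [hne1]), if_neg (by simp [hne1])]
    have hloop : loopA (s : Int) 4 = 4 := by
      unfold loopA
      simp only [beq_iff_eq]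
      have : ¬ pyCeilDiv (s : Int) ((3 : Int) + 1) = 1 := by
        intro h; exact hc (by norm_num at h ⊢; exact h)
      rw [if_neg (by simpa using this)]
    rw [hloop]
    have hcb : (pyCeilDiv (s : Int) 4 == 1) = false := by
      rw [beq_eq_false_iff_ne]; exact hc
    simp [hcb]

-- ===== VERDICT (by name: the statement is the Claim_ definition above) =====
theorem getPlotDimensions_spec : Claim_equal_getPlotDimensions := by
  intro labels _
  unfold Spec_getPlotDimensions getPlotDimensions getPlotDimensions_alt
  exact ports_eq_of_size labels.length
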